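-- pv_equiv track=rewrite | github.com/pavel812bigtech/lab2 | DC_huff.py | get_dc_category
-- ===== SOURCE A (Python) =====
-- def get_dc_category(value):
--     """Возвращает категорию (SIZE) для разностного DC коэффициента"""
--     if value == 0:
--         return 0
--     abs_val = abs(value)
--     category = 1
--     while abs_val >= (1 << category):
--         category += 1
--     return category
-- ===== SOURCE B (Python) =====
-- def get_dc_category(value):
--     """Возвращает категорию (SIZE) для разностного DC коэффициента"""
--     return abs(value).bit_length()
-- ===== Notes on version B (the rewrite author's own statement) =====
-- stated objective: idiomatic
-- what changed: Replaced the incremental doubling loop with the closed form abs(value).bit_length(), which is exactly the JPEG SIZE category.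
import Mathlib
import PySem

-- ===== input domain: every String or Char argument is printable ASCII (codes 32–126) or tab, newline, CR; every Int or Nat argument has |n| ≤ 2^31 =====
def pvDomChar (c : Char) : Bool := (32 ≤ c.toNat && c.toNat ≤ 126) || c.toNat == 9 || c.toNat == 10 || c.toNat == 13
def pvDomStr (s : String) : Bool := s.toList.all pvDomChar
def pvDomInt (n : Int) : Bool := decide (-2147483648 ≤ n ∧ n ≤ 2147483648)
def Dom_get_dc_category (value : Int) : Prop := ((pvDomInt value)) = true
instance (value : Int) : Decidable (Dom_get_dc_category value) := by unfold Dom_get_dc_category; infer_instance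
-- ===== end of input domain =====

-- B replaces A's incremental doubling loop with the closed-form bit length of |value| (idiomatic).

-- ===== PORT A =====
-- the 'while abs_val >= (1 << category): category += 1' loop, step for step
def pvALoop (absVal : Nat) (category : Nat) : Nat :=
  if absVal ≥ 2 ^ category then pvALoop absVal (category + 1) else category
termination_by absVal + 1 - 2 ^ category
decreasing_by
  have h1 : 2 ^ category < 2 ^ (category + 1) :=
    Nat.pow_lt_pow_right (by norm_num) (Nat.lt_succ_self category)
  omega

def get_dc_category (value : Int) : Int :=
  if value = 0 then 0
  else (pvALoop value.natAbs 1 : Int)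

-- ===== PORT B =====
-- abs(value).bit_length() = Nat.size of the absolute value
def get_dc_category_alt (value : Int) : Int := (Nat.size value.natAbs : Int)

-- ===== PRECONDITION & SPEC =====
def Spec_get_dc_category (value : Int) (out : Int) : Prop := out = get_dc_category_alt value
instance (value : Int) (out : Int) : Decidable (Spec_get_dc_category value out) := by unfold Spec_get_dc_category; infer_instance

-- ===== CLAIM (what is proved, stated in full; the proofs are below) =====
def Claim_equal_get_dc_category : Prop := ∀ (value : Int), Dom_get_dc_category value → Spec_get_dc_category value (get_dc_category value)

-- ===== LEMMAS AND PROOFS =====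
theorem pvALoop_eq (absVal category : Nat) : pvALoop absVal category = max category (Nat.size absVal) := by
  induction category using pvALoop.induct absVal with
  | case1 c h ih =>
      rw [pvALoop]; simp only [h, if_pos]
      have hc : c < Nat.size absVal := Nat.lt_size.mpr h
      omega
  | case2 c h =>
      rw [pvALoop, if_neg h]
      have hc : Nat.size absVal ≤ c := Nat.size_le.mpr (by omega)
      omega

-- ===== VERDICT (by name: the statement is the Claim_ definition above) =====
theorem get_dc_category_spec : Claim_equal_get_dc_category := by
  intro value _
  unfold Spec_get_dc_category get_dc_category get_dc_category_alt
  by_cases h : value = 0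
  · simp [h, Nat.size_zero]
  · have hpos : 1 ≤ value.natAbs := Nat.one_le_iff_ne_zero.mpr (Int.natAbs_ne_zero.mpr h)
    have hsz : 1 ≤ Nat.size value.natAbs := Nat.lt_size.mpr (by simpa using hpos)
    simp [h, pvALoop_eq, Nat.max_eq_right hsz]
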